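-- pv_equiv track=rewrite | github.com/mfurt/impro_task | main.py | get_advanced_results
-- ===== SOURCE A (Python) =====
-- def get_advanced_results(basic_results):
--     d_keys = [key for key in basic_results if key.startswith('D')]
--     d_keys = sorted(d_keys)
--
--     m_keys = [key for key in basic_results if key.startswith('M')]
--     m_keys = sorted(m_keys)
--
--     ms_keys = [m_key.replace('M', 'MS') for m_key in m_keys]
--
--     n_values = len(basic_results[d_keys[0]])
--     variant_dict = {}
--
--     for i in range(n_values):
--         variant = tuple([basic_results[d_key][i] for d_key in d_keys])
--
--         if variant not in variant_dict:
--             variant_dict[variant] = {m_key: [basic_results[m_key][i]] for m_key in m_keys}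
--         else:
--             for m_key in m_keys:
--                 variant_dict[variant][m_key] += [basic_results[m_key][i]]
--
--     advanced_results = {key: [] for key in d_keys + ms_keys}
--
--     for variant, m_dict in variant_dict.items():
--         for d_key, d_val in zip(d_keys, variant):
--             advanced_results[d_key].append(d_val)
--
--         for m_key, m_values in m_dict.items():
--             advanced_results[m_key.replace('M', 'MS')].append(sum(m_values))
--
--     return advanced_results
-- ===== SOURCE B (Python) =====
-- def get_advanced_results(basic_results):
--     d_keys = sorted(k for k in basic_results if k.startswith('D'))
--     m_keys = sorted(k for k in basic_results if k.startswith('M'))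
--     variants = [tuple(basic_results[k][i] for k in d_keys)
--                 for i in range(len(basic_results[d_keys[0]]))]
--     uniq = list(dict.fromkeys(variants))
--     out = {k: [v[j] for v in uniq] for j, k in enumerate(d_keys)}
--     for k in m_keys:
--         out[k.replace('M', 'MS')] = [
--             sum(c for w, c in zip(variants, basic_results[k]) if w == v)
--             for v in uniq]
--     return out
-- ===== Notes on version B (the rewrite author's own statement) =====
-- stated objective: simpler
-- what changed: B replaces A's mutated nested dict of per-variant value lists plus a second summing/appending loop over dict items by materialising the row variant tuples once, deduplicating them with dict.fromkeys, and building every output column directly with a comprehension (D columns by tuple projection, MS columns by a filtered zip-sum).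
import Mathlib
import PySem

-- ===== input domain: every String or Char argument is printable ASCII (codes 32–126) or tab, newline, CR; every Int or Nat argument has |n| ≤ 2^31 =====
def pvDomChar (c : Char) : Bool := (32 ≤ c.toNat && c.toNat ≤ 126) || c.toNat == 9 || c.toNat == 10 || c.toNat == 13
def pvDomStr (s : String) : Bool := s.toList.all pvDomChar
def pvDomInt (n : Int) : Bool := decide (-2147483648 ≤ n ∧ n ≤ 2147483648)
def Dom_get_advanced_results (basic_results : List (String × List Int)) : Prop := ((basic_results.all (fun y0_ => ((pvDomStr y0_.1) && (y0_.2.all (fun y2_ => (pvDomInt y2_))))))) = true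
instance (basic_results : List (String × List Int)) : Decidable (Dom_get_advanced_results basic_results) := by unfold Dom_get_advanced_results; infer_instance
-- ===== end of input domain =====

-- B is a simpler re-implementation: it materialises the per-row variant tuples once, dedups them
-- (dict.fromkeys) and builds each output column by a direct comprehension, instead of A's mutated
-- nested dict of value lists plus a second summing loop.  Objective: simpler; not claimed faster.

-- ===== PORT A =====
-- shared helpers (both Pythons compute these the same way): the input dict, its keys,
-- the sorted D-/M- key lists, column lookup, the row count, and s.replace('M','MS')
def pvRepl (k : String) : String := PySem.Str.replace k "M" "MS"
def pvDict (l : List (String × List Int)) : PySem.Dict String (List Int) := PySem.Dict.ofList l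
def pvKeys (l : List (String × List Int)) : List String := (pvDict l).keys
def pvDKeys (l : List (String × List Int)) : List String :=
  PySem.List.sorted ((pvKeys l).filter (fun k => PySem.Str.startswith k "D")) (fun k => k) false
def pvMKeys (l : List (String × List Int)) : List String :=
  PySem.List.sorted ((pvKeys l).filter (fun k => PySem.Str.startswith k "M")) (fun k => k) false
def pvCol (l : List (String × List Int)) (k : String) : List Int := (pvDict l).getD k []
def pvN (l : List (String × List Int)) : Nat := (pvCol l ((pvDKeys l).headD "")).length

def get_advanced_results (basic_results : List (String × List Int)) : List (String × List Int) :=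
  let d_keys := pvDKeys basic_results
  let m_keys := pvMKeys basic_results
  let ms_keys := m_keys.map pvRepl
  let n_values := pvN basic_results
  let variant_dict : PySem.Dict (List Int) (PySem.Dict String (List Int)) :=
    (PySem.List.pyRange 0 (n_values : Int) 1).foldl (fun vd i =>
      let variant := d_keys.map (fun k => PySem.List.pyGetD (pvCol basic_results k) i 0)
      if vd.contains variant then
        m_keys.foldl (fun vd2 mk =>
          vd2.modify variant PySem.Dict.empty (fun md =>
            md.modify mk [] (fun vs => vs ++ [PySem.List.pyGetD (pvCol basic_results mk) i 0]))) vd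
      else
        vd.insert variant (m_keys.foldl (fun md mk =>
          md.insert mk [PySem.List.pyGetD (pvCol basic_results mk) i 0]) PySem.Dict.empty))
      PySem.Dict.empty
  let advanced0 := (d_keys ++ ms_keys).foldl (fun a k => a.insert k ([] : List Int)) PySem.Dict.empty
  let adv := variant_dict.items.foldl (fun a p =>
      let a1 := (d_keys.zip p.1).foldl (fun a2 q => a2.modify q.1 [] (fun vs => vs ++ [q.2])) a
      p.2.items.foldl (fun a2 q => a2.modify (pvRepl q.1) [] (fun vs => vs ++ [q.2.sum])) a1)
    advanced0
  adv.items

-- ===== PORT B =====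
def get_advanced_results_alt (basic_results : List (String × List Int)) : List (String × List Int) :=
  let d_keys := pvDKeys basic_results
  let m_keys := pvMKeys basic_results
  let variants := (PySem.List.pyRange 0 (pvN basic_results : Int) 1).map (fun i =>
      d_keys.map (fun k => PySem.List.pyGetD (pvCol basic_results k) i 0))
  let uniq := PySem.List.dedup variants
  let out := (PySem.List.enumerate d_keys 0).foldl (fun o jk =>
      o.insert jk.2 (uniq.map (fun v => PySem.List.pyGetD v jk.1 0))) PySem.Dict.empty
  let out := m_keys.foldl (fun o k =>
      o.insert (pvRepl k)
        (uniq.map (fun v =>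
          ((((variants.zip (pvCol basic_results k)).filter (fun wc => wc.1 == v)).map (fun wc => wc.2)).sum)))) out
  out.items

-- ===== PRECONDITION & SPEC =====
-- Pre_ excludes exactly the inputs where the Python A raises an IndexError: dicts with no D-key
-- at all, and dicts where some D-/M-column is shorter than the first (sorted-order) D-column.
def Pre_get_advanced_results (basic_results : List (String × List Int)) : Prop :=
  pvDKeys basic_results ≠ [] ∧
  ∀ k ∈ pvKeys basic_results,
    (PySem.Str.startswith k "D" || PySem.Str.startswith k "M") = true →
      pvN basic_results ≤ (pvCol basic_results k).length
instance (basic_results : List (String × List Int)) : Decidable (Pre_get_advanced_results basic_results) := by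
  unfold Pre_get_advanced_results; infer_instance
def pvWitness_get_advanced_results : (List (String × List Int)) :=
  [("D1", [0, 0, 1]), ("M1", [1, 2, 3])]
def Spec_get_advanced_results (basic_results : List (String × List Int)) (out : List (String × List Int)) : Prop :=
  out = get_advanced_results_alt basic_results
instance (basic_results : List (String × List Int)) (out : List (String × List Int)) : Decidable (Spec_get_advanced_results basic_results out) := by
  unfold Spec_get_advanced_results; infer_instance

-- ===== CLAIM (what is proved, stated in full; the proofs are below) =====
def Claim_equal_get_advanced_results : Prop := ∀ (basic_results : List (String × List Int)), Dom_get_advanced_results basic_results → Pre_get_advanced_results basic_results → Spec_get_advanced_results basic_results (get_advanced_results basic_results)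

-- ===== LEMMAS AND PROOFS =====

-- proof-side abbreviations
def pvVars (l : List (String × List Int)) : List (List Int) :=
  (PySem.List.pyRange 0 (pvN l : Int) 1).map (fun i =>
      (pvDKeys l).map (fun k => PySem.List.pyGetD (pvCol l k) i 0))
def pvUniq (l : List (String × List Int)) : List (List Int) := PySem.List.dedup (pvVars l)

-- characterization of s.replace('M','MS'): insert an 'S' after every 'M'
def pvExpand (c : Char) : List Char := if c = 'M' then ['M', 'S'] else [c]

theorem pv_go_spec : ∀ (fuel : Nat) (s acc : List Char), s.length ≤ fuel →
    PySem.Chars.replace.go ['M'] ['M', 'S'] fuel s acc = acc.reverse ++ s.flatMap pvExpand := by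
  intro fuel
  induction fuel with
  | zero =>
      intro s acc h
      have hs : s = [] := by cases s <;> simp_all
      subst hs
      rw [PySem.Chars.replace.go]
      simp
  | succ m ih =>
      intro s acc h
      cases s with
      | nil => rw [PySem.Chars.replace.go]; simp; omega
      | cons c t =>
          rw [PySem.Chars.replace.go]
          have hlt : t.length ≤ m := by simpa using h
          by_cases hc : c = 'M'
          · subst hc
            have hpre : List.isPrefixOf ['M'] ('M' :: t) = true := by
              simp [List.isPrefixOf]
            simp only [hpre, if_pos, List.length_cons, List.length_nil, List.drop_succ_cons,
              List.drop_zero]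
            rw [ih t _ hlt]
            simp [pvExpand]
          · have hpre : List.isPrefixOf ['M'] (c :: t) = false := by
              simp [List.isPrefixOf]
              exact fun hh => absurd hh.symm hc
            simp only [hpre, Bool.false_eq_true, if_false]
            rw [ih t _ hlt]
            simp [pvExpand, hc]

theorem pv_repl_toList (k : String) : (pvRepl k).toList = k.toList.flatMap pvExpand := by
  show (PySem.Str.replace k "M" "MS").toList = _
  rw [PySem.Str.toList_replace]
  have h1 : ("M" : String).toList = ['M'] := rfl
  have h2 : ("MS" : String).toList = ['M', 'S'] := rfl
  rw [h1, h2]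
  unfold PySem.Chars.replace
  have : (['M'] : List Char).isEmpty = false := rfl
  rw [this]
  simp only [Bool.false_eq_true, if_false]
  rw [pv_go_spec _ _ _ (le_refl _)]
  simp

theorem pv_expand_head : ∀ c : Char, ∃ r, pvExpand c = c :: r := by
  intro c; by_cases h : c = 'M' <;> simp [pvExpand, h]

theorem pv_expand_inj : ∀ (s t : List Char), s.flatMap pvExpand = t.flatMap pvExpand → s = t := by
  intro s
  induction s with
  | nil =>
      intro t h
      cases t with
      | nil => rfl
      | cons d t' =>
          obtain ⟨r, hr⟩ := pv_expand_head d
          simp [hr] at h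
  | cons c s' ih =>
      intro t h
      cases t with
      | nil =>
          obtain ⟨r, hr⟩ := pv_expand_head c
          simp [hr] at h
      | cons d t' =>
          obtain ⟨rc, hrc⟩ := pv_expand_head c
          obtain ⟨rd, hrd⟩ := pv_expand_head d
          simp only [List.flatMap_cons, hrc, hrd, List.cons_append] at h
          obtain ⟨hcd, hrest⟩ := List.cons.inj h
          subst hcd
          have hr2 : rc = rd := by
            have := hrc.symm.trans hrd
            exact (List.cons.inj this).2
          subst hr2
          have htail : s'.flatMap pvExpand = t'.flatMap pvExpand :=
            List.append_cancel_left hrest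
          rw [ih t' htail]

theorem pv_repl_inj : Function.Injective pvRepl := by
  intro a b h
  rw [← String.toList_inj] at h ⊢
  rw [pv_repl_toList, pv_repl_toList] at h
  exact pv_expand_inj _ _ h

theorem pv_sw_head (k : String) (c : Char) (p : String) (hp : p.toList = [c])
    (hc : PySem.Str.startswith k p = true) : ∃ r, k.toList = c :: r := by
  rw [PySem.Str.startswith_eq, hp] at hc
  obtain ⟨t, ht⟩ := (PySem.Chars.startswith_iff _ _).mp hc
  exact ⟨t, ht.symm⟩

theorem pv_repl_head (k : String) (hc : PySem.Str.startswith k "M" = true) :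
    ∃ r, (pvRepl k).toList = 'M' :: r := by
  obtain ⟨r, hr⟩ := pv_sw_head k 'M' "M" rfl hc
  refine ⟨('S' :: r.flatMap pvExpand), ?_⟩
  rw [pv_repl_toList, hr]
  simp [pvExpand]

theorem pv_ne_of_heads {s t : String} {a b : List Char}
    (hs : s.toList = 'D' :: a) (ht : t.toList = 'M' :: b) : s ≠ t := by
  intro h; subst h; rw [hs] at ht; simp at ht

-- memberships and nodup facts
theorem pv_mem_dks {l : List (String × List Int)} {k : String} (h : k ∈ pvDKeys l) :
    k ∈ pvKeys l ∧ PySem.Str.startswith k "D" = true := by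
  have := (PySem.List.mem_sorted _ _ _ _).mp h
  simpa using List.mem_filter.mp this

theorem pv_mem_mks {l : List (String × List Int)} {k : String} (h : k ∈ pvMKeys l) :
    k ∈ pvKeys l ∧ PySem.Str.startswith k "M" = true := by
  have := (PySem.List.mem_sorted _ _ _ _).mp h
  simpa using List.mem_filter.mp this

theorem pv_nodup_dks (l : List (String × List Int)) : (pvDKeys l).Nodup := by
  refine (PySem.List.sorted_perm _ _ _).nodup_iff.mpr ?_
  exact (PySem.Dict.nodup_keys_ofList l).filter _

theorem pv_nodup_mks (l : List (String × List Int)) : (pvMKeys l).Nodup := by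
  refine (PySem.List.sorted_perm _ _ _).nodup_iff.mpr ?_
  exact (PySem.Dict.nodup_keys_ofList l).filter _

theorem pv_nodup_msks (l : List (String × List Int)) : ((pvMKeys l).map pvRepl).Nodup :=
  (pv_nodup_mks l).map pv_repl_inj

theorem pv_dks_ne_repl {l : List (String × List Int)} {d m : String}
    (hd : d ∈ pvDKeys l) (hm : m ∈ pvMKeys l) : d ≠ pvRepl m := by
  obtain ⟨rd, hrd⟩ := pv_sw_head d 'D' "D" rfl (pv_mem_dks hd).2
  obtain ⟨rm, hrm⟩ := pv_repl_head m (pv_mem_mks hm).2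
  exact pv_ne_of_heads hrd hrm

theorem pv_nodup_all (l : List (String × List Int)) :
    ((pvDKeys l) ++ (pvMKeys l).map pvRepl).Nodup := by
  refine List.Nodup.append (pv_nodup_dks l) (pv_nodup_msks l) ?_
  intro d hd hd'
  obtain ⟨m, hm, hrm⟩ := List.mem_map.mp hd'
  exact pv_dks_ne_repl hd hm hrm.symm

-- ===== generic dict lemmas =====

theorem pv_mm {κ ν : Type} [BEq κ] [LawfulBEq κ] (d : PySem.Dict κ ν) (k : κ) (d0 : ν) (f g : ν → ν) :
    (d.modify k d0 f).modify k d0 g = d.modify k d0 (fun x => g (f x)) := by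
  simp [PySem.Dict.modify, PySem.Dict.insert_insert_self, PySem.Dict.getD_insert_self]

theorem pv_getD_cons {κ ν : Type} [BEq κ] (a : κ) (b : ν) (tl : List (κ × ν)) (k : κ) (d0 : ν)
    (h : (a == k) = false) :
    (PySem.Dict.mk ((a, b) :: tl)).getD k d0 = (PySem.Dict.mk tl).getD k d0 := by
  simp [PySem.Dict.getD, PySem.Dict.get?_mk_cons, h]

theorem pv_insert_cons {κ ν : Type} [BEq κ] (a : κ) (b : ν) (tl : List (κ × ν)) (k : κ) (v : ν)
    (h : (a == k) = false) :
    (PySem.Dict.mk ((a, b) :: tl)).insert k v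
      = PySem.Dict.mk ((a, b) :: ((PySem.Dict.mk tl).insert k v).items) := by
  unfold PySem.Dict.insert
  have hcc : (PySem.Dict.mk ((a, b) :: tl)).contains k = (PySem.Dict.mk tl).contains k := by
    simp [PySem.Dict.contains, h]
  by_cases hct : (PySem.Dict.mk tl).contains k = true
  · rw [hcc, hct]
    simp [h]
  · rw [hcc]
    simp only [Bool.not_eq_true] at hct
    simp [hct]

theorem pv_insert_getD_self {κ ν : Type} [BEq κ] [LawfulBEq κ] (d : PySem.Dict κ ν) (k : κ) (d0 : ν)
    (hnd : d.keys.Nodup) (hc : d.contains k = true) : d.insert k (d.getD k d0) = d := by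
  obtain ⟨ps⟩ := d
  induction ps with
  | nil => simp [PySem.Dict.contains] at hc
  | cons hd tl ih =>
      obtain ⟨a, b⟩ := hd
      by_cases hak : (a == k) = true
      · have hak' : a = k := eq_of_beq hak
        subst hak'
        have hget : (PySem.Dict.mk ((a, b) :: tl)).getD a d0 = b := by
          simp [PySem.Dict.getD, PySem.Dict.get?_mk_cons]
        rw [hget]
        have hcont : (PySem.Dict.mk ((a, b) :: tl)).contains a = true := by
          simp [PySem.Dict.contains]
        apply PySem.Dict.ext
        rw [PySem.Dict.items_insert_of_contains _ _ hcont]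
        simp only [List.map_cons, BEq.rfl, if_pos]
        congr 1
        have hnotin0 : a ∉ tl.map Prod.fst := by
          have h2 := hnd
          simp only [PySem.Dict.keys_mk, List.map_cons] at h2
          exact (List.nodup_cons.mp h2).1
        calc List.map (fun p => if (p.1 == a) = true then (a, b) else p) tl
            = List.map id tl := by
              apply List.map_congr_left
              intro p hp
              have hpf : (p.1 == a) = false := beq_eq_false_iff_ne.mpr
                (fun hpa => hnotin0 (List.mem_map.mpr ⟨p, hp, hpa⟩))
              simp [hpf]
          _ = tl := List.map_id tl
      · have hak' : (a == k) = false := by simpa using hak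
        rw [pv_getD_cons a b tl k d0 hak', pv_insert_cons a b tl k _ hak']
        have hc2 : (PySem.Dict.mk tl).contains k = true := by
          simp [PySem.Dict.contains, hak'] at hc
          simpa [PySem.Dict.contains] using hc
        have hnd2 : (PySem.Dict.mk tl).keys.Nodup := by
          simp [PySem.Dict.keys_mk] at hnd ⊢
          exact hnd.2
        rw [ih hnd2 hc2]

theorem pv_nodup_keys_modify {κ ν : Type} [BEq κ] [LawfulBEq κ] (d : PySem.Dict κ ν) (k : κ)
    (d0 : ν) (f : ν → ν) (hnd : d.keys.Nodup) : (d.modify k d0 f).keys.Nodup := by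
  have := PySem.Dict.nodup_keys_foldl_insert [k] (fun d x => f (d.getD x d0)) d hnd
  simpa [PySem.Dict.modify] using this

theorem pv_compose {κ ν β : Type} [BEq κ] [LawfulBEq κ] (L : List β) (G : β → ν → ν) (k : κ) (d0 : ν) :
    ∀ d : PySem.Dict κ ν, d.keys.Nodup → d.contains k = true →
    L.foldl (fun d b => d.modify k d0 (G b)) d = d.modify k d0 (fun x => L.foldl (fun y b => G b y) x) := by
  induction L with
  | nil =>
      intro d hnd hc
      simp only [List.foldl_nil]
      show d = d.insert k (d.getD k d0)
      exact (pv_insert_getD_self d k d0 hnd hc).symm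
  | cons b L' ih =>
      intro d hnd hc
      simp only [List.foldl_cons]
      rw [ih (d.modify k d0 (G b)) (pv_nodup_keys_modify d k d0 (G b) hnd)
        (by simp [PySem.Dict.contains_modify]), pv_mm]

theorem pv_modmap {α κ ν : Type} [BEq κ] [LawfulBEq κ] (xs : List α) (g : α → κ) (h : α → ν)
    (hn : (xs.map g).Nodup) {a0 : α} (ha : a0 ∈ xs) (d0 : ν) (F : ν → ν) :
    (PySem.Dict.mk (xs.map (fun a => (g a, h a)))).modify (g a0) d0 F
      = PySem.Dict.mk (xs.map (fun a => (g a, if g a == g a0 then F (h a0) else h a))) := by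
  have hmem : (g a0, h a0) ∈ xs.map (fun a => (g a, h a)) := List.mem_map.mpr ⟨a0, ha, rfl⟩
  have hkeys : (PySem.Dict.mk (xs.map (fun a => (g a, h a)))).keys.Nodup := by
    simpa [PySem.Dict.keys_mk, List.map_map, Function.comp] using hn
  have hgetD : (PySem.Dict.mk (xs.map (fun a => (g a, h a)))).getD (g a0) d0 = h a0 :=
    PySem.Dict.getD_of_mem_items _ hmem hkeys d0
  have hcont : (PySem.Dict.mk (xs.map (fun a => (g a, h a)))).contains (g a0) = true := by
    simp only [PySem.Dict.contains, List.any_eq_true]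
    exact ⟨(g a0, h a0), hmem, by simp⟩
  show (PySem.Dict.mk (xs.map (fun a => (g a, h a)))).insert (g a0)
      (F ((PySem.Dict.mk (xs.map (fun a => (g a, h a)))).getD (g a0) d0)) = _
  rw [hgetD]
  apply PySem.Dict.ext
  rw [PySem.Dict.items_insert_of_contains _ _ hcont]
  show List.map _ (List.map _ xs) = _
  rw [List.map_map]
  apply List.map_congr_left
  intro a _
  by_cases hb : (g a == g a0) = true
  · simp only [Function.comp_apply, hb, if_pos]
    rw [eq_of_beq hb]
  · simp only [Bool.not_eq_true] at hb
    simp [Function.comp_apply, hb]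

theorem pv_pass_single {κ ν : Type} [BEq κ] [LawfulBEq κ] (k0 k : κ) (x : ν) (rest : List (κ × ν))
    (hne : k ≠ k0) (d0 : ν) (F : ν → ν) :
    (PySem.Dict.mk ((k0, x) :: rest)).modify k d0 F
      = PySem.Dict.mk ((k0, x) :: ((PySem.Dict.mk rest).modify k d0 F).items) := by
  have hf : (k0 == k) = false := beq_eq_false_iff_ne.mpr (Ne.symm hne)
  show (PySem.Dict.mk ((k0, x) :: rest)).insert k (F ((PySem.Dict.mk ((k0, x) :: rest)).getD k d0)) = _
  rw [pv_getD_cons k0 x rest k d0 hf, pv_insert_cons k0 x rest k _ hf]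
  rfl

theorem pv_pass {κ ν β : Type} [BEq κ] [LawfulBEq κ] (L : List β) (key : β → κ) (H : β → ν → ν)
    (d0 : ν) (k0 : κ) (x : ν) (hk : ∀ b ∈ L, key b ≠ k0) :
    ∀ rest : List (κ × ν),
    (L.foldl (fun md b => md.modify (key b) d0 (H b)) (PySem.Dict.mk ((k0, x) :: rest)))
      = PySem.Dict.mk ((k0, x) :: (L.foldl (fun md b => md.modify (key b) d0 (H b)) (PySem.Dict.mk rest)).items) := by
  induction L with
  | nil => intro rest; rfl
  | cons b L' ih =>
      intro rest
      simp only [List.foldl_cons]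
      rw [pv_pass_single k0 (key b) x rest (hk b List.mem_cons_self) d0 (H b)]
      rw [ih (fun b' hb' => hk b' (List.mem_cons_of_mem b hb')) (((PySem.Dict.mk rest).modify (key b) d0 (H b)).items)]

theorem pv_updall {κ ν : Type} [BEq κ] [LawfulBEq κ] (ks : List κ) (hn : ks.Nodup)
    (val : κ → ν) (H : κ → ν → ν) (d0 : ν) :
    ks.foldl (fun md k => md.modify k d0 (H k)) (PySem.Dict.mk (ks.map (fun k => (k, val k))))
      = PySem.Dict.mk (ks.map (fun k => (k, H k (val k)))) := by
  induction ks generalizing val with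
  | nil => rfl
  | cons k0 ks' ih =>
      have hk0 : k0 ∉ ks' := (List.nodup_cons.mp hn).1
      have htl : ks'.Nodup := (List.nodup_cons.mp hn).2
      simp only [List.foldl_cons, List.map_cons]
      have hstep := pv_modmap (κ := κ) (ν := ν) (k0 :: ks') (fun k => k) val
        (by simpa using hn) (a0 := k0) List.mem_cons_self d0 (H k0)
      simp only [List.map_cons] at hstep
      rw [hstep]
      have hrw : List.map (fun k => (k, if (k == k0) = true then H k0 (val k0) else val k)) ks'
          = List.map (fun k => (k, val k)) ks' := by
        apply List.map_congr_left
        intro k hkm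
        have : (k == k0) = false := beq_eq_false_iff_ne.mpr (fun h => hk0 (h ▸ hkm))
        simp [this]
      simp only [BEq.rfl, if_pos]
      rw [hrw]
      rw [pv_pass ks' (fun k => k) H d0 k0 (H k0 (val k0))
        (fun b hb => fun h => hk0 (h ▸ hb)) (ks'.map (fun k => (k, val k)))]
      rw [ih htl val]

theorem pv_zipfilter_nil {κ ν : Type} [BEq κ] [LawfulBEq κ] (ks : List κ) (vs : List ν) (k0 : κ)
    (h : k0 ∉ ks) : (ks.zip vs).filter (fun p => p.1 == k0) = [] := by
  induction ks generalizing vs with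
  | nil => simp
  | cons k ks' ih =>
      cases vs with
      | nil => simp
      | cons v vs' =>
          have h1 : (k == k0) = false :=
            beq_eq_false_iff_ne.mpr (fun hh => h (hh ▸ List.mem_cons_self))
          simp only [List.zip_cons_cons, List.filter_cons, h1]
          exact ih vs' (fun hh => h (List.mem_cons_of_mem k hh))

theorem pv_zipfilter_one {κ ν : Type} [BEq κ] [LawfulBEq κ] (ks : List κ) (vs : List ν) (d0 : ν)
    (hn : ks.Nodup) (j : Nat) (hj : j < ks.length) (hlen : ks.length = vs.length) :
    (ks.zip vs).filter (fun p => p.1 == ks[j]) = [(ks[j], vs.getD j d0)] := by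
  induction ks generalizing vs j with
  | nil => simp at hj
  | cons k ks' ih =>
      cases vs with
      | nil => simp at hlen
      | cons v vs' =>
          have hk0 : k ∉ ks' := (List.nodup_cons.mp hn).1
          have htl : ks'.Nodup := (List.nodup_cons.mp hn).2
          cases j with
          | zero =>
              simp only [List.zip_cons_cons, List.filter_cons, List.getElem_cons_zero, BEq.rfl,
                if_pos, List.getD_cons_zero]
              rw [pv_zipfilter_nil ks' vs' k hk0]
          | succ j' =>
              have hj' : j' < ks'.length := by simpa using hj
              have hlen' : ks'.length = vs'.length := by simpa using hlen
              have hne : (k == ks'[j']) = false := beq_eq_false_iff_ne.mpr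
                (fun hh => hk0 (by rw [hh]; exact ks'.getElem_mem hj'))
              simp only [List.zip_cons_cons, List.filter_cons, List.getElem_cons_succ,
                List.getD_cons_succ, hne, Bool.false_eq_true, if_false]
              exact ih vs' htl j' hj' hlen' 

theorem pv_filter_self {κ : Type} [BEq κ] [LawfulBEq κ] (ks : List κ) (hn : ks.Nodup)
    (j : Nat) (hj : j < ks.length) : ks.filter (fun k => k == ks[j]) = [ks[j]] := by
  induction ks generalizing j with
  | nil => simp at hj
  | cons k ks' ih =>
      have hk0 : k ∉ ks' := (List.nodup_cons.mp hn).1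
      have htl : ks'.Nodup := (List.nodup_cons.mp hn).2
      cases j with
      | zero =>
          simp only [List.getElem_cons_zero, List.filter_cons, BEq.rfl, if_pos]
          have hnil : ks'.filter (fun x => x == k) = [] := by
            apply List.filter_eq_nil_iff.mpr
            intro x hx hh
            exact hk0 (eq_of_beq hh ▸ hx)
          rw [hnil]
      | succ j' =>
          have hj' : j' < ks'.length := by simpa using hj
          have hne : (k == ks'[j']) = false := beq_eq_false_iff_ne.mpr
            (fun hh => hk0 (by rw [hh]; exact ks'.getElem_mem hj'))
          simp only [List.filter_cons, List.getElem_cons_succ, hne, Bool.false_eq_true, if_false]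
          exact ih htl j' hj' 

theorem pv_getD0 {κ : Type} [BEq κ] (ks : List κ) (c : κ) :
    (PySem.Dict.mk (ks.map (fun k => (k, ([] : List Int))))).getD c [] = [] := by
  induction ks with
  | nil => rfl
  | cons k ks' ih =>
      simp only [List.map_cons]
      rw [show (PySem.Dict.mk ((k, ([] : List Int)) :: ks'.map (fun k => (k, ([] : List Int))))).getD c []
        = if (k == c) = true then [] else (PySem.Dict.mk (ks'.map (fun k => (k, ([] : List Int))))).getD c [] from ?_]
      · split <;> simp [ih]
      · simp only [PySem.Dict.getD, PySem.Dict.get?_mk_cons]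
        split <;> rfl

theorem pv_keys_mapdict {α κ ν : Type} [BEq κ] (xs : List α) (g : α → κ) (h : α → ν) :
    (PySem.Dict.mk (xs.map (fun a => (g a, h a)))).keys = xs.map g := by
  rw [PySem.Dict.keys_mk, List.map_map]
  rfl

-- ===== phase 1: the variant_dict loop =====

theorem pv_phase1 (mks : List String) (hmn : mks.Nodup) (f : Int → List Int) (w : String → Int → Int) :
    ∀ I : List Int,
    I.foldl (fun vd i =>
        if vd.contains (f i) then
          mks.foldl (fun vd2 mk => vd2.modify (f i) PySem.Dict.empty (fun md =>
            md.modify mk [] (fun vs => vs ++ [w mk i]))) vd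
        else
          vd.insert (f i) (mks.foldl (fun md mk => md.insert mk [w mk i]) PySem.Dict.empty))
      PySem.Dict.empty
    = PySem.Dict.mk ((PySem.List.dedup (I.map f)).map (fun v =>
        (v, PySem.Dict.mk (mks.map (fun mk => (mk, (I.filter (fun i => f i == v)).map (w mk))))))) := by
  intro I
  induction I using List.reverseRecOn with
  | nil => rfl
  | append_singleton I i0 ih =>
      rw [List.foldl_append, List.foldl_cons, List.foldl_nil, ih]
      simp only [List.map_append, List.map_cons, List.map_nil, PySem.List.dedup_eq_ofList,
        PySem.Set.ofList_append_singleton]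
      by_cases hv : f i0 ∈ PySem.Set.ofList (I.map f)
      · have hUnodup : (PySem.Set.ofList (I.map f)).Nodup := PySem.Set.nodup_ofList _
        have hknd : (PySem.Dict.mk ((PySem.Set.ofList (I.map f)).map (fun v =>
            (v, PySem.Dict.mk (mks.map (fun mk =>
              (mk, (I.filter (fun i => f i == v)).map (w mk)))))))).keys.Nodup := by
          rw [pv_keys_mapdict]
          simp
        have hcont : (PySem.Dict.mk ((PySem.Set.ofList (I.map f)).map (fun v =>
            (v, PySem.Dict.mk (mks.map (fun mk =>
              (mk, (I.filter (fun i => f i == v)).map (w mk)))))))).contains (f i0) = true := by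
          simp only [PySem.Dict.contains, List.any_eq_true]
          exact ⟨_, List.mem_map.mpr ⟨f i0, hv, rfl⟩, by simp⟩
        rw [if_pos hcont]
        rw [pv_compose mks (fun mk => fun md => md.modify mk [] (fun vs => vs ++ [w mk i0]))
          (f i0) PySem.Dict.empty _ hknd hcont]
        rw [pv_modmap (PySem.Set.ofList (I.map f)) (fun v => v)
          (fun v => PySem.Dict.mk (mks.map (fun mk =>
            (mk, (I.filter (fun i => f i == v)).map (w mk)))))
          (by simp) hv PySem.Dict.empty _]
        simp only [pv_updall mks hmn (fun mk => (I.filter (fun i => f i == f i0)).map (w mk))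
          (fun mk vs => vs ++ [w mk i0]) []]
        have hadd : PySem.Set.add (PySem.Set.ofList (I.map f)) (f i0)
            = PySem.Set.ofList (I.map f) := by
          simp [PySem.Set.add, hv]
        rw [hadd]
        congr 1
        apply List.map_congr_left
        intro v hvm
        by_cases hvv : v = f i0
        · subst hvv
          simp [List.filter_append]
        · have h1 : (v == f i0) = false := beq_eq_false_iff_ne.mpr hvv
          have h2 : (f i0 == v) = false := beq_eq_false_iff_ne.mpr (Ne.symm hvv)
          simp [h1, h2, List.filter_append]
      · have hcont : (PySem.Dict.mk ((PySem.Set.ofList (I.map f)).map (fun v =>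
            (v, PySem.Dict.mk (mks.map (fun mk =>
              (mk, (I.filter (fun i => f i == v)).map (w mk)))))))).contains (f i0) = false := by
          simp only [PySem.Dict.contains]
          rw [List.any_eq_false]
          intro p hp
          obtain ⟨v, hvm, rfl⟩ := List.mem_map.mp hp
          intro hbeq
          have he : v = f i0 := eq_of_beq hbeq
          exact hv (he ▸ hvm)
        rw [if_neg (by simp [hcont])]
        have hinner : (mks.foldl (fun md mk => md.insert mk [w mk i0]) PySem.Dict.empty)
            = PySem.Dict.mk (mks.map (fun mk => (mk, [w mk i0]))) := by
          apply PySem.Dict.ext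
          have := PySem.Dict.items_foldl_insert_fresh mks (fun mk => mk)
            (fun mk => [w mk i0]) PySem.Dict.empty (fun a _ => rfl) (by simpa using hmn)
          simpa using this
        rw [hinner]
        have hadd : PySem.Set.add (PySem.Set.ofList (I.map f)) (f i0)
            = PySem.Set.ofList (I.map f) ++ [f i0] := by
          simp [PySem.Set.add, hv]
        rw [hadd]
        apply PySem.Dict.ext
        rw [PySem.Dict.items_insert_of_not_contains _ _ hcont]
        simp only [List.map_append, List.map_cons, List.map_nil]
        have hv' : f i0 ∉ I.map f := fun h => hv ((PySem.Set.mem_ofList _ _).mpr h)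
        congr 1
        · apply List.map_congr_left
          intro v hvm
          have h2 : (f i0 == v) = false := beq_eq_false_iff_ne.mpr
            (fun h => hv (by rw [h]; exact hvm))
          simp [List.filter_append, h2]
        · have hfil : I.filter (fun i => f i == f i0) = [] := by
            apply List.filter_eq_nil_iff.mpr
            intro i hi hbeq
            exact hv' (List.mem_map.mpr ⟨i, hi, eq_of_beq hbeq⟩)
          simp [List.filter_append, hfil]

-- ===== main assembly =====

theorem pv_phase2 (dks mks : List String) (vals : String → List Int → List Int)
    (U : List (List Int)) : ∀ (a0 : PySem.Dict String (List Int)),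
    U.foldl (fun a v =>
        mks.foldl (fun a2 mk => a2.modify (pvRepl mk) [] (fun vs => vs ++ [(vals mk v).sum]))
          ((dks.zip v).foldl (fun a2 q => a2.modify q.1 [] (fun vs => vs ++ [q.2])) a)) a0
    = (U.flatMap (fun v => dks.zip v ++ mks.map (fun mk => (pvRepl mk, (vals mk v).sum)))).foldl
        (fun a2 q => a2.modify q.1 [] (fun vs => vs ++ [q.2])) a0 := by
  induction U with
  | nil => intro a0; rfl
  | cons v U' ih =>
      intro a0
      rw [List.foldl_cons, ih, List.flatMap_cons, List.foldl_append, List.foldl_append,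
        List.foldl_map]

theorem pv_flatMap_singleton {α β : Type} (U : List α) (g : α → List β) (h : α → β)
    (hg : ∀ v ∈ U, g v = [h v]) : U.flatMap g = U.map h := by
  induction U with
  | nil => rfl
  | cons v U' ih =>
      rw [List.flatMap_cons, hg v List.mem_cons_self,
        ih (fun v' hv' => hg v' (List.mem_cons_of_mem v hv')), List.map_cons]
      rfl

def pvVals (l : List (String × List Int)) (mk : String) (v : List Int) : List Int :=
  ((PySem.List.pyRange 0 ((pvN l : Nat) : Int) 1).filter (fun i =>
      (pvDKeys l).map (fun k => PySem.List.pyGetD (pvCol l k) i 0) == v)).map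
    (fun i => PySem.List.pyGetD (pvCol l mk) i 0)

def pvEvents (l : List (String × List Int)) : List (String × Int) :=
  (pvUniq l).flatMap (fun v =>
    (pvDKeys l).zip v ++ (pvMKeys l).map (fun mk => (pvRepl mk, (pvVals l mk v).sum)))

theorem pv_A_items (l : List (String × List Int)) :
    get_advanced_results l
      = ((pvDKeys l) ++ (pvMKeys l).map pvRepl).map
          (fun k => (k, ((pvEvents l).filter (fun p => p.1 == k)).map (fun p => p.2))) := by
  simp only [get_advanced_results]
  rw [pv_phase1 (pvMKeys l) (pv_nodup_mks l)
    (fun i => (pvDKeys l).map (fun k => PySem.List.pyGetD (pvCol l k) i 0))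
    (fun mk i => PySem.List.pyGetD (pvCol l mk) i 0)
    (PySem.List.pyRange 0 ((pvN l : Nat) : Int) 1)]
  simp only [List.foldl_map]
  rw [pv_phase2 (pvDKeys l) (pvMKeys l)
    (fun mk v => List.map (fun i => PySem.List.pyGetD (pvCol l mk) i 0)
      (List.filter (fun i =>
        List.map (fun k => PySem.List.pyGetD (pvCol l k) i 0) (pvDKeys l) == v)
        (PySem.List.pyRange 0 ((pvN l : Nat) : Int) 1)))
    (PySem.List.dedup
      (List.map (fun i => List.map (fun k => PySem.List.pyGetD (pvCol l k) i 0) (pvDKeys l))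
        (PySem.List.pyRange 0 ((pvN l : Nat) : Int) 1)))]
  have hadv0 : ((pvDKeys l ++ (pvMKeys l).map pvRepl).foldl
        (fun a k => a.insert k ([] : List Int)) PySem.Dict.empty)
      = PySem.Dict.mk ((pvDKeys l ++ (pvMKeys l).map pvRepl).map (fun k => (k, ([] : List Int)))) := by
    apply PySem.Dict.ext
    have := PySem.Dict.items_foldl_insert_fresh (pvDKeys l ++ (pvMKeys l).map pvRepl)
      (fun k => k) (fun _ => ([] : List Int)) PySem.Dict.empty
      (fun a _ => rfl) (by simpa using pv_nodup_all l)
    simpa using this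
  rw [hadv0]
  show ((pvEvents l).foldl (fun a2 q => a2.modify q.1 [] (fun vs => vs ++ [q.2]))
      (PySem.Dict.mk ((pvDKeys l ++ (pvMKeys l).map pvRepl).map (fun k => (k, ([] : List Int)))))).items
    = _
  have hkeys : (((pvEvents l).foldl
        (fun a2 q => a2.modify q.1 [] (fun vs => vs ++ [q.2]))
        (PySem.Dict.mk ((pvDKeys l ++ (pvMKeys l).map pvRepl).map (fun k => (k, ([] : List Int))))))).keys
      = pvDKeys l ++ (pvMKeys l).map pvRepl := by
    rw [PySem.Dict.keys_foldl_modify_key]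
    rw [pv_keys_mapdict]
    rw [PySem.Set.update_eq_append_filter]
    have hnilf : ((PySem.Set.ofList ((pvEvents l).map Prod.fst)).filter
        (fun y => !PySem.Set.contains ((pvDKeys l ++ (pvMKeys l).map pvRepl).map (fun k => k)) y)) = [] := by
      apply List.filter_eq_nil_iff.mpr
      intro y hy
      have hy' : y ∈ (pvEvents l).map Prod.fst := (PySem.Set.mem_ofList _ _).mp hy
      obtain ⟨q, hq, rfl⟩ := List.mem_map.mp hy'
      have hqm : q.1 ∈ pvDKeys l ++ (pvMKeys l).map pvRepl := by
        obtain ⟨v, _, hqv⟩ := List.mem_flatMap.mp hq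
        rcases List.mem_append.mp hqv with hz | hm
        · exact List.mem_append.mpr (Or.inl (List.of_mem_zip hz).1)
        · obtain ⟨mk, hmk, rfl⟩ := List.mem_map.mp hm
          exact List.mem_append.mpr (Or.inr (List.mem_map.mpr ⟨mk, hmk, rfl⟩))
      simp [PySem.Set.contains]
      intro hnd
      rcases List.mem_append.mp hqm with h | h
      · exact absurd h hnd
      · obtain ⟨a, ha, hae⟩ := List.mem_map.mp h
        exact ⟨a, ha, hae⟩
    rw [hnilf, List.append_nil]
    simp
  have hnd : (((pvEvents l).foldl
        (fun a2 q => a2.modify q.1 [] (fun vs => vs ++ [q.2]))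
        (PySem.Dict.mk ((pvDKeys l ++ (pvMKeys l).map pvRepl).map (fun k => (k, ([] : List Int))))))).keys.Nodup := by
    rw [hkeys]; exact pv_nodup_all l
  rw [PySem.Dict.items_eq_map_keys _ hnd [], hkeys]
  apply List.map_congr_left
  intro k _
  rw [PySem.Dict.getD_foldl_modify_append, pv_getD0]
  rfl

theorem pv_B_items (l : List (String × List Int)) :
    get_advanced_results_alt l
      = (PySem.List.enumerate (pvDKeys l) 0).map (fun jk =>
          (jk.2, (pvUniq l).map (fun v => PySem.List.pyGetD v jk.1 0)))
        ++ (pvMKeys l).map (fun mk => (pvRepl mk, (pvUniq l).map (fun v =>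
            ((((pvVars l).zip (pvCol l mk)).filter (fun wc => wc.1 == v)).map
              (fun wc => wc.2)).sum))) := by
  simp only [get_advanced_results_alt]
  rw [show ((PySem.List.pyRange 0 ((pvN l : Nat) : Int) 1).map (fun i =>
      (pvDKeys l).map (fun k => PySem.List.pyGetD (pvCol l k) i 0))) = pvVars l from rfl]
  rw [show PySem.List.dedup (pvVars l) = pvUniq l from rfl]
  have h1 := PySem.Dict.items_foldl_insert_fresh (PySem.List.enumerate (pvDKeys l) 0)
      (fun jk => jk.2)
      (fun jk => (pvUniq l).map (fun v => PySem.List.pyGetD v jk.1 0)) PySem.Dict.empty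
      (fun a _ => rfl)
      (by rw [PySem.List.map_snd_enumerate]; exact pv_nodup_dks l)
  dsimp only at h1
  have hkeys1 : ((PySem.List.enumerate (pvDKeys l) 0).foldl (fun o jk =>
        o.insert jk.2 ((pvUniq l).map (fun v => PySem.List.pyGetD v jk.1 0)))
        PySem.Dict.empty).keys = pvDKeys l := by
    simp only [PySem.Dict.keys, h1]
    rw [List.map_append, List.map_map]
    rw [show ((fun x : String × List Int => x.1) ∘
        (fun a : Int × String => (a.2, (pvUniq l).map (fun v => PySem.List.pyGetD v a.1 0))))
      = (fun a : Int × String => a.2) from rfl]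
    rw [PySem.List.map_snd_enumerate]
    rfl
  have h2 := PySem.Dict.items_foldl_insert_fresh (pvMKeys l) (fun mk => pvRepl mk)
      (fun mk => (pvUniq l).map (fun v =>
        ((((pvVars l).zip (pvCol l mk)).filter (fun wc => wc.1 == v)).map
          (fun wc => wc.2)).sum))
      ((PySem.List.enumerate (pvDKeys l) 0).foldl (fun o jk =>
        o.insert jk.2 ((pvUniq l).map (fun v => PySem.List.pyGetD v jk.1 0)))
        PySem.Dict.empty)
      (fun mk hmk => by
        apply Bool.eq_false_iff.mpr
        intro hct
        simp only [PySem.Dict.contains, List.any_eq_true] at hct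
        obtain ⟨p, hp, hbeq⟩ := hct
        have hpk : p.1 ∈ ((PySem.List.enumerate (pvDKeys l) 0).foldl (fun o jk =>
            o.insert jk.2 ((pvUniq l).map (fun v => PySem.List.pyGetD v jk.1 0)))
            PySem.Dict.empty).keys := by
          simp only [PySem.Dict.keys]
          exact List.mem_map.mpr ⟨p, hp, rfl⟩
        rw [hkeys1] at hpk
        exact pv_dks_ne_repl hpk hmk (eq_of_beq hbeq))
      (by simpa using pv_nodup_msks l)
  dsimp only at h2
  rw [h2, h1]
  rfl

theorem pv_sumlist (l : List (String × List Int)) (hpre : Pre_get_advanced_results l)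
    {mk : String} (hmk : mk ∈ pvMKeys l) (v : List Int) :
    (((pvVars l).zip (pvCol l mk)).filter (fun wc => wc.1 == v)).map (fun wc => wc.2)
      = pvVals l mk v := by
  have hn : (pvN l) ≤ (pvCol l mk).length := by
    refine hpre.2 mk (pv_mem_mks hmk).1 ?_
    simp only [Bool.or_eq_true]
    exact Or.inr (pv_mem_mks hmk).2
  have hz2 : (PySem.List.pyRange 0 ((pvN l : Nat) : Int) 1).zip (pvCol l mk)
      = (PySem.List.pyRange 0 ((pvN l : Nat) : Int) 1).map
          (fun i => (i, PySem.List.pyGetD (pvCol l mk) i 0)) := by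
    apply List.ext_getElem
    · simp [PySem.List.length_pyRange_one]
      omega
    · intro idx h1 h2
      have hlr : idx < (PySem.List.pyRange 0 ((pvN l : Nat) : Int) 1).length := by
        simpa using h2
      have hidx : (PySem.List.pyRange 0 ((pvN l : Nat) : Int) 1)[idx]'hlr = (idx : Int) := by
        rw [PySem.List.getElem_pyRange_one]
        simp
      have hcl : idx < (pvCol l mk).length := by
        have hin : idx < pvN l := by
          simpa [PySem.List.length_pyRange_one] using hlr
        omega
      rw [List.getElem_zip, List.getElem_map]
      refine Prod.ext_iff.mpr ⟨rfl, ?_⟩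
      show (pvCol l mk)[idx] = PySem.List.pyGetD (pvCol l mk)
        ((PySem.List.pyRange 0 ((pvN l : Nat) : Int) 1)[idx]'hlr) 0
      rw [hidx, PySem.List.pyGetD_natCast, List.getD_eq_getElem _ _ hcl]
  have hz1 : (pvVars l).zip (pvCol l mk)
      = ((PySem.List.pyRange 0 ((pvN l : Nat) : Int) 1).zip (pvCol l mk)).map
          (Prod.map (fun i => (pvDKeys l).map (fun k => PySem.List.pyGetD (pvCol l k) i 0)) id) := by
    show ((PySem.List.pyRange 0 ((pvN l : Nat) : Int) 1).map
        (fun i => (pvDKeys l).map (fun k => PySem.List.pyGetD (pvCol l k) i 0))).zip (pvCol l mk) = _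
    rw [List.zip_map_left]
  rw [hz1, hz2, List.map_map, List.filter_map, List.map_map]
  rfl

theorem pv_main (l : List (String × List Int)) (hpre : Pre_get_advanced_results l) :
    get_advanced_results l = get_advanced_results_alt l := by
  rw [pv_A_items l, pv_B_items l]
  have hUlen : ∀ v ∈ pvUniq l, v.length = (pvDKeys l).length := by
    intro v hv
    have hv' : v ∈ pvVars l := by
      simpa [pvUniq, PySem.List.dedup_eq_ofList, PySem.Set.mem_ofList] using hv
    obtain ⟨i, _, rfl⟩ := List.mem_map.mp hv'
    simp
  rw [List.map_append]
  congr 1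
  · -- D columns
    apply List.ext_getElem
    · simp [PySem.List.length_enumerate]
    · intro j hj1 hj2
      have hc : j < (pvDKeys l).length := by simpa using hj1
      rw [List.getElem_map, List.getElem_map, PySem.List.getElem_enumerate]
      refine Prod.ext_iff.mpr ⟨rfl, ?_⟩
      show ((pvEvents l).filter (fun p => p.1 == (pvDKeys l)[j])).map (fun p => p.2)
        = (pvUniq l).map (fun v => PySem.List.pyGetD v (0 + (j : Int)) 0)
      have hcol : ((pvEvents l).filter (fun p => p.1 == (pvDKeys l)[j])).map (fun p => p.2)
          = (pvUniq l).map (fun v => v.getD j 0) := by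
        unfold pvEvents
        rw [List.filter_flatMap, List.map_flatMap]
        apply pv_flatMap_singleton
        intro v hv
        rw [List.filter_append, List.map_append]
        rw [pv_zipfilter_one (pvDKeys l) v (0 : Int) (pv_nodup_dks l) j hc ((hUlen v hv).symm)]
        have hmsnil : ((pvMKeys l).map (fun mk => (pvRepl mk, (pvVals l mk v).sum))).filter
            (fun p => p.1 == (pvDKeys l)[j]) = [] := by
          rw [List.filter_map]
          have hf : (pvMKeys l).filter ((fun p => p.1 == (pvDKeys l)[j]) ∘
              (fun mk => (pvRepl mk, (pvVals l mk v).sum))) = [] := by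
            apply List.filter_eq_nil_iff.mpr
            intro mk hmk hbeq
            exact pv_dks_ne_repl (List.getElem_mem hc) hmk (eq_of_beq hbeq).symm
          rw [hf, List.map_nil]
        rw [hmsnil]
        simp
      rw [hcol]
      apply List.map_congr_left
      intro v _
      have : (0 + (j : Int)) = ((j : Nat) : Int) := by omega
      rw [this, PySem.List.pyGetD_natCast]
  · -- MS columns
    rw [List.map_map]
    apply List.ext_getElem
    · simp
    · intro j hj1 hj2
      have hc : j < (pvMKeys l).length := by simpa using hj1
      rw [List.getElem_map, List.getElem_map]
      have hmkmem : (pvMKeys l)[j] ∈ pvMKeys l := List.getElem_mem hc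
      refine Prod.ext_iff.mpr ⟨rfl, ?_⟩
      show ((pvEvents l).filter (fun p => p.1 == pvRepl ((pvMKeys l)[j]))).map (fun p => p.2)
        = (pvUniq l).map (fun v =>
            ((((pvVars l).zip (pvCol l ((pvMKeys l)[j]))).filter (fun wc => wc.1 == v)).map
              (fun wc => wc.2)).sum)
      have hcol : ((pvEvents l).filter (fun p => p.1 == pvRepl ((pvMKeys l)[j]))).map (fun p => p.2)
          = (pvUniq l).map (fun v => (pvVals l ((pvMKeys l)[j]) v).sum) := by
        unfold pvEvents
        rw [List.filter_flatMap, List.map_flatMap]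
        apply pv_flatMap_singleton
        intro v hv
        rw [List.filter_append, List.map_append]
        rw [pv_zipfilter_nil (pvDKeys l) v _ (fun hd => pv_dks_ne_repl hd hmkmem rfl)]
        rw [List.filter_map]
        have hf : (pvMKeys l).filter ((fun p => p.1 == pvRepl ((pvMKeys l)[j])) ∘
            (fun mk => (pvRepl mk, (pvVals l mk v).sum))) = [(pvMKeys l)[j]] := by
          have hcongr : ∀ mk ∈ pvMKeys l, ((fun p => p.1 == pvRepl ((pvMKeys l)[j])) ∘
              (fun mk => (pvRepl mk, (pvVals l mk v).sum))) mk = (mk == (pvMKeys l)[j]) := by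
            intro mk _
            by_cases h : mk = (pvMKeys l)[j]
            · simp [h]
            · have h2 : pvRepl mk ≠ pvRepl ((pvMKeys l)[j]) := fun hh => h (pv_repl_inj hh)
              simp [h, h2]
          rw [List.filter_congr hcongr]
          exact pv_filter_self (pvMKeys l) (pv_nodup_mks l) j hc
        rw [hf, List.map_cons, List.map_nil, List.map_cons, List.map_nil]
        rfl
      rw [hcol]
      apply List.map_congr_left
      intro v _
      rw [← pv_sumlist l hpre hmkmem v]

-- ===== VERDICT (by name: the statement is the Claim_ definition above) =====
theorem get_advanced_results_spec : Claim_equal_get_advanced_results := by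
  intro l _hdom hpre
  unfold Spec_get_advanced_results
  exact pv_main l hpre
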